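-- pv_equiv track=rewrite | github.com/nickAnhel/S6 | Graphs/L1/src/matrix.py | find_vertexes_with_greater_weight_sum
-- ===== SOURCE A (Python) =====
-- def find_vertexes_with_greater_weight_sum(
--     value: int,
--     adj_matrix: list[list[int]],
-- ) -> list[int]:
--     result = []
--
--     for i, row in enumerate(adj_matrix):
--         outgoing_sum = sum(row)
--         incoming_sum = sum(row[i] for row in adj_matrix)
--
--         if outgoing_sum + incoming_sum > value:
--             result.append(i)
--
--     return result
-- ===== SOURCE B (Python) =====
-- def find_vertexes_with_greater_weight_sum(
--     value: int,
--     adj_matrix: list[list[int]],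
-- ) -> list[int]:
--     n = len(adj_matrix)
--     row_sums = []
--     col_sums = [0] * n
--     for row in adj_matrix:
--         row_sums.append(sum(row))
--         col_sums = [c + w for c, w in zip(col_sums, row)]
--     return [i for i in range(n) if row_sums[i] + col_sums[i] > value]
-- ===== Notes on version B (the rewrite author's own statement) =====
-- stated objective: alternative
-- what changed: Replaces A's per-vertex re-scan of the whole matrix for its column sum with a single accumulation pass that builds row_sums and a col_sums vector (pointwise zip-add per row), followed by one comparison loop over the vertices.
import Mathlib
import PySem

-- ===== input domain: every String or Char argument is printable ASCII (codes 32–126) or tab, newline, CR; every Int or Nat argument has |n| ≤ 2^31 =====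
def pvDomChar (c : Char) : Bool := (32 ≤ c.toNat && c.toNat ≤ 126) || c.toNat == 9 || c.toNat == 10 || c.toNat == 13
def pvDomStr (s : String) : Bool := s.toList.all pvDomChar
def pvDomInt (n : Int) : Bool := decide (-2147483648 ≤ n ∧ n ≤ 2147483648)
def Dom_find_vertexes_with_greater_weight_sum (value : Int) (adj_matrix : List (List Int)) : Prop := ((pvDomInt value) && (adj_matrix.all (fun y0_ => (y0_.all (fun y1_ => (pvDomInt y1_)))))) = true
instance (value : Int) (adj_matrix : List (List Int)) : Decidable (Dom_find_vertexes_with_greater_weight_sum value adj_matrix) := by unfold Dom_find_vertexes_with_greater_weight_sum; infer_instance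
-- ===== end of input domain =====

-- B replaces A's per-vertex column re-scan with one accumulation pass (row sums plus a zip-added
-- column-sum vector) and a final comparison loop: a different decomposition, same cost.


-- ===== PORT A =====
def find_vertexes_with_greater_weight_sum (value : Int) (adj_matrix : List (List Int)) : List Int :=
  (PySem.List.enumerate adj_matrix 0).foldl
    (fun result p =>
      let outgoing_sum := p.2.sum
      let incoming_sum := adj_matrix.foldl (fun s row => s + PySem.List.pyGetD row p.1 0) 0
      if outgoing_sum + incoming_sum > value then result ++ [p.1] else result)
    []

-- ===== PORT B =====
def find_vertexes_with_greater_weight_sum_alt (value : Int) (adj_matrix : List (List Int)) : List Int :=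
  let n := adj_matrix.length
  let st := adj_matrix.foldl
    (fun (st : List Int × List Int) row =>
      (st.1 ++ [row.sum], (st.2.zip row).map (fun p => p.1 + p.2)))
    ([], List.replicate n 0)
  (PySem.List.pyRange 0 n 1).filter
    (fun i => PySem.List.pyGetD st.1 i 0 + PySem.List.pyGetD st.2 i 0 > value)

-- ===== PRECONDITION & SPEC =====
-- Pre_ excludes ragged matrices with a row shorter than the number of rows: on those both A and B
-- raise IndexError (A when indexing row[i], B when indexing the zip-shortened col_sums).
def Pre_find_vertexes_with_greater_weight_sum (value : Int) (adj_matrix : List (List Int)) : Prop :=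
  ∀ row ∈ adj_matrix, adj_matrix.length ≤ row.length
instance (value : Int) (adj_matrix : List (List Int)) : Decidable (Pre_find_vertexes_with_greater_weight_sum value adj_matrix) := by unfold Pre_find_vertexes_with_greater_weight_sum; infer_instance
def pvWitness_find_vertexes_with_greater_weight_sum : Int × List (List Int) := (3, [[1, 2], [0, 1]])

def Spec_find_vertexes_with_greater_weight_sum (value : Int) (adj_matrix : List (List Int)) (out : List Int) : Prop := out = find_vertexes_with_greater_weight_sum_alt value adj_matrix
instance (value : Int) (adj_matrix : List (List Int)) (out : List Int) : Decidable (Spec_find_vertexes_with_greater_weight_sum value adj_matrix out) := by unfold Spec_find_vertexes_with_greater_weight_sum; infer_instance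

-- ===== CLAIM (what is proved, stated in full; the proofs are below) =====
def Claim_equal_find_vertexes_with_greater_weight_sum : Prop := ∀ (value : Int) (adj_matrix : List (List Int)), Dom_find_vertexes_with_greater_weight_sum value adj_matrix → Pre_find_vertexes_with_greater_weight_sum value adj_matrix → Spec_find_vertexes_with_greater_weight_sum value adj_matrix (find_vertexes_with_greater_weight_sum value adj_matrix)

-- ===== LEMMAS AND PROOFS =====
def colN (adj : List (List Int)) (k : Nat) : Int :=
  adj.foldl (fun s row => s + row.getD k 0) 0

theorem enumerate_eq (adj : List (List Int)) (s : Int) :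
    PySem.List.enumerate adj s
      = (List.range adj.length).map (fun k => (s + Int.ofNat k, adj.getD k [])) := by
  induction adj generalizing s with
  | nil => simp [PySem.List.enumerate_nil]
  | cons row rest ih =>
    rw [PySem.List.enumerate_cons, ih]
    simp only [List.length_cons, List.range_succ_eq_map, List.map_cons, List.map_map]
    congr 1
    · simp
    · apply List.map_congr_left
      intro k _
      simp only [Function.comp_apply]
      refine Prod.ext ?_ rfl
      simp only [Int.ofNat_eq_natCast]
      push_cast
      ring

-- B fold invariant
theorem fold_inv (adj : List (List Int)) (acc1 acc2 : List Int)
    (hlen : ∀ row ∈ adj, acc2.length ≤ row.length) :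
    (adj.foldl (fun (st : List Int × List Int) row =>
        (st.1 ++ [row.sum], (st.2.zip row).map (fun p => p.1 + p.2))) (acc1, acc2)).1
      = acc1 ++ adj.map List.sum
    ∧ (adj.foldl (fun (st : List Int × List Int) row =>
        (st.1 ++ [row.sum], (st.2.zip row).map (fun p => p.1 + p.2))) (acc1, acc2)).2.length
      = acc2.length
    ∧ ∀ k < acc2.length,
      (adj.foldl (fun (st : List Int × List Int) row =>
        (st.1 ++ [row.sum], (st.2.zip row).map (fun p => p.1 + p.2))) (acc1, acc2)).2.getD k 0
        = acc2.getD k 0 + colN adj k := by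
  induction adj generalizing acc1 acc2 with
  | nil => simp [colN]
  | cons row rest ih =>
    have hrow : acc2.length ≤ row.length := hlen row (List.mem_cons_self ..)
    have hzlen : ((acc2.zip row).map (fun p : Int × Int => p.1 + p.2)).length = acc2.length := by
      simp [Nat.min_eq_left hrow]
    obtain ⟨h1, h2, h3⟩ := ih (acc1 ++ [row.sum]) ((acc2.zip row).map (fun p => p.1 + p.2))
      (by intro r hr; rw [hzlen]; exact hlen r (List.mem_cons_of_mem _ hr))
    refine ⟨?_, ?_, ?_⟩
    · simpa using h1
    · simpa [hzlen] using h2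
    · intro k hk
      have := h3 k (by omega)
      simp only [List.foldl_cons] at *
      rw [this]
      have hk2 : k < ((acc2.zip row).map (fun p : Int × Int => p.1 + p.2)).length := by omega
      have : ((acc2.zip row).map (fun p : Int × Int => p.1 + p.2)).getD k 0
          = acc2.getD k 0 + row.getD k 0 := by
        rw [List.getD_eq_getElem _ _ hk2, List.getD_eq_getElem _ _ hk,
            List.getD_eq_getElem _ _ (by omega : k < row.length)]
        simp [List.getElem_zip]
      rw [this]
      have hcol : colN (row :: rest) k = row.getD k 0 + colN rest k := by
        simp only [colN, List.foldl_cons, zero_add]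
        rw [PySem.List.foldl_add, PySem.List.foldl_add]
        simp
      rw [hcol]; ring

theorem ab_agree (value : Int) (adj : List (List Int))
    (hpre : ∀ row ∈ adj, adj.length ≤ row.length) :
    find_vertexes_with_greater_weight_sum value adj
      = find_vertexes_with_greater_weight_sum_alt value adj := by
  obtain ⟨h1, h2, h3⟩ := fold_inv adj [] (List.replicate adj.length 0)
    (by simpa using hpre)
  -- A side
  rw [find_vertexes_with_greater_weight_sum, enumerate_eq]
  rw [show (fun result (p : ℤ × List ℤ) =>
        have outgoing_sum := p.2.sum;
        have incoming_sum := List.foldl (fun s row => s + PySem.List.pyGetD row p.1 0) 0 adj;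
        if outgoing_sum + incoming_sum > value then result ++ [p.1] else result)
      = (fun (result : List ℤ) (p : ℤ × List ℤ) =>
          if (decide (p.2.sum + List.foldl (fun s row => s + PySem.List.pyGetD row p.1 0) 0 adj > value)) = true
          then result ++ [p.1] else result) from by funext r p; simp]
  rw [PySem.List.foldl_append_if, List.filter_map]
  -- B side
  simp only [find_vertexes_with_greater_weight_sum_alt]
  rw [PySem.List.pyRange_one, List.filter_map]
  simp only [List.nil_append, List.map_map] at *
  refine congrArg₂ _ (by funext k; simp) ?_
  apply List.filter_congr
  intro k hk
  simp only [List.mem_range] at hk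
  simp only [Function.comp_apply, decide_eq_decide]
  have hlen2 : (List.replicate adj.length 0 : List Int).length = adj.length := by simp
  have hcols := h3 k (by simpa using hk)
  have hrep : (List.replicate adj.length (0:Int)).getD k 0 = 0 := by
    rw [List.getD_eq_getElem _ _ (by simpa using hk)]; simp
  rw [hrep, zero_add] at hcols
  simp only [zero_add, Int.ofNat_eq_natCast, PySem.List.pyGetD_natCast]
  rw [h1, hcols]
  have hmap : (adj.map List.sum).getD k 0 = (adj.getD k []).sum := by
    rw [List.getD_eq_getElem _ _ (by simpa using hk), List.getD_eq_getElem _ _ hk]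
    simp
  rw [hmap, colN]

-- ===== VERDICT (by name: the statement is the Claim_ definition above) =====
theorem find_vertexes_with_greater_weight_sum_spec : Claim_equal_find_vertexes_with_greater_weight_sum := by
  intro value adj _ hpre
  unfold Spec_find_vertexes_with_greater_weight_sum
  exact ab_agree value adj hpre
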